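-- pv_equiv track=rewrite | github.com/xylgz1989/DCAE | src/requirements_conflict_detector.py | _dependencies_conflict
-- ===== SOURCE A (Python) =====
-- def _dependencies_conflict(dep1: str, dep2: str) -> bool:
--     """Check if two dependencies conflict with each other."""
--     # Define known conflicting dependencies
--     conflicts = {
--         ('relational', 'nosql'),
--         ('monolithic', 'microservice'),
--         ('synchronous', 'asynchronous'),
--         ('pull', 'push'),
--     }
--
--     # Check if the dependencies are in conflict
--     for conflict_pair in conflicts:
--         if dep1 in conflict_pair and dep2 in conflict_pair and dep1 != dep2:
--             return True
--
--     return False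
-- ===== SOURCE B (Python) =====
-- _BASE = [
--     ('relational', 'nosql'),
--     ('monolithic', 'microservice'),
--     ('synchronous', 'asynchronous'),
--     ('pull', 'push'),
-- ]
--
-- # Precompute the set of all ORDERED conflicting pairs (both orientations),
-- # so the check is a single tuple-membership test with no per-pair logic.
-- _ORDERED_CONFLICTS = {p for a, b in _BASE for p in ((a, b), (b, a))}
--
--
-- def _dependencies_conflict(dep1: str, dep2: str) -> bool:
--     """Check if two dependencies conflict with each other."""
--     return (dep1, dep2) in _ORDERED_CONFLICTS
-- ===== Notes on version B (the rewrite author's own statement) =====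
-- stated objective: idiomatic
-- what changed: A precomputation pass explodes each unordered conflict pair into both ordered orientations once at module load; the function itself is then a single tuple-membership test on the ordered-pair set, eliminating A's runtime loop with its two per-pair membership tests and inequality check.
import Mathlib
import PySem

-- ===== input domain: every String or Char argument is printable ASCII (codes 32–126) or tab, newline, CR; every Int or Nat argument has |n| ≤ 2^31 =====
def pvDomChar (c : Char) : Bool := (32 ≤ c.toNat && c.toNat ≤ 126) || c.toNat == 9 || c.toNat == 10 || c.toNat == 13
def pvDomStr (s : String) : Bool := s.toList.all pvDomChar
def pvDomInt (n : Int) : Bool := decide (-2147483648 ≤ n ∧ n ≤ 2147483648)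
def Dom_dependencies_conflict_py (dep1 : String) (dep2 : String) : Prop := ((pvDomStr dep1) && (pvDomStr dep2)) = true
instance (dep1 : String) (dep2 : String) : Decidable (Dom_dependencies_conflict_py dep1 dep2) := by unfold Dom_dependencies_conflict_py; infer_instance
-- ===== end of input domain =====

set_option maxHeartbeats 1000000


-- B precomputes the set of all ordered conflicting pairs (both orientations of each base
-- pair) and answers with one tuple-membership test, removing A's runtime loop (idiomatic).

-- ===== PORT A =====
-- the set of conflicting pairs, iterated in order
def pvConflicts : List (String × String) :=
  [("relational", "nosql"), ("monolithic", "microservice"),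
   ("synchronous", "asynchronous"), ("pull", "push")]

-- the for-loop with early return: `dep in pair` is membership in the 2-tuple
def pvLoopA (d1 d2 : String) : List (String × String) → Bool
  | [] => false
  | (a, b) :: rest =>
    if ((d1 == a || d1 == b) && (d2 == a || d2 == b) && d1 != d2) then true
    else pvLoopA d1 d2 rest

def dependencies_conflict_py (dep1 : String) (dep2 : String) : Bool :=
  pvLoopA dep1 dep2 pvConflicts

-- ===== PORT B =====
-- _BASE: the four unordered conflict pairs
def pvBase : List (String × String) :=
  [("relational", "nosql"), ("monolithic", "microservice"),
   ("synchronous", "asynchronous"), ("pull", "push")]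

-- _ORDERED_CONFLICTS = {p for a, b in _BASE for p in ((a, b), (b, a))}
def pvOrderedConflicts : PySem.Set (String × String) :=
  PySem.Set.ofList (pvBase.flatMap (fun p => [(p.1, p.2), (p.2, p.1)]))

-- return (dep1, dep2) in _ORDERED_CONFLICTS
def dependencies_conflict_py_alt (dep1 : String) (dep2 : String) : Bool :=
  PySem.Set.contains pvOrderedConflicts (dep1, dep2)

-- ===== PRECONDITION & SPEC =====
def Spec_dependencies_conflict_py (dep1 : String) (dep2 : String) (out : Bool) : Prop := out = dependencies_conflict_py_alt dep1 dep2
instance (dep1 : String) (dep2 : String) (out : Bool) : Decidable (Spec_dependencies_conflict_py dep1 dep2 out) := by unfold Spec_dependencies_conflict_py; infer_instance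

-- ===== CLAIM (what is proved, stated in full; the proofs are below) =====
def Claim_equal_dependencies_conflict_py : Prop := ∀ (dep1 : String) (dep2 : String), Dom_dependencies_conflict_py dep1 dep2 → Spec_dependencies_conflict_py dep1 dep2 (dependencies_conflict_py dep1 dep2)

-- ===== LEMMAS AND PROOFS =====
theorem pvOrderedConflicts_eval : pvOrderedConflicts =
    [("relational", "nosql"), ("nosql", "relational"),
     ("monolithic", "microservice"), ("microservice", "monolithic"),
     ("synchronous", "asynchronous"), ("asynchronous", "synchronous"),
     ("pull", "push"), ("push", "pull")] := by decide

-- ===== VERDICT (by name: the statement is the Claim_ definition above) =====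
theorem dependencies_conflict_py_spec : Claim_equal_dependencies_conflict_py := by
  intro dep1 dep2 _
  unfold Spec_dependencies_conflict_py dependencies_conflict_py dependencies_conflict_py_alt
  rw [pvOrderedConflicts_eval]
  simp only [pvConflicts, pvLoopA, PySem.Set.contains, List.contains_cons,
    List.contains_nil]
  by_cases h : dep1 = "relational"
  · subst h; by_cases g1 : dep2 = "relational" <;> by_cases g2 : dep2 = "nosql" <;> simp_all <;> (try exact fun e => g2 e.symm)
  by_cases h : dep1 = "nosql"
  · subst h; by_cases g1 : dep2 = "nosql" <;> by_cases g2 : dep2 = "relational" <;> simp_all <;> (try exact fun e => g2 e.symm)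
  by_cases h : dep1 = "monolithic"
  · subst h; by_cases g1 : dep2 = "monolithic" <;> by_cases g2 : dep2 = "microservice" <;> simp_all <;> (try exact fun e => g2 e.symm)
  by_cases h : dep1 = "microservice"
  · subst h; by_cases g1 : dep2 = "microservice" <;> by_cases g2 : dep2 = "monolithic" <;> simp_all <;> (try exact fun e => g2 e.symm)
  by_cases h : dep1 = "synchronous"
  · subst h; by_cases g1 : dep2 = "synchronous" <;> by_cases g2 : dep2 = "asynchronous" <;> simp_all <;> (try exact fun e => g2 e.symm)
  by_cases h : dep1 = "asynchronous"
  · subst h; by_cases g1 : dep2 = "asynchronous" <;> by_cases g2 : dep2 = "synchronous" <;> simp_all <;> (try exact fun e => g2 e.symm)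
  by_cases h : dep1 = "pull"
  · subst h; by_cases g1 : dep2 = "pull" <;> by_cases g2 : dep2 = "push" <;> simp_all <;> (try exact fun e => g2 e.symm)
  by_cases h : dep1 = "push"
  · subst h; by_cases g1 : dep2 = "push" <;> by_cases g2 : dep2 = "pull" <;> simp_all <;> (try exact fun e => g2 e.symm)
  split_ifs <;> simp_all
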